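-- pv_equiv track=rewrite | github.com/lejaeyun/MyStudy | BOJ/2. 분류/수학/2455 지능형 기차.py | getMaxNumInSubway
-- ===== SOURCE A (Python) =====
-- def getMaxNumInSubway(subway_inout_list):
--     max_num = 0
--     current_num = 0
--     for inout_list in subway_inout_list:
--         out, enter = inout_list
--         current_num = current_num - out + enter
--         max_num = max(max_num,  current_num)
--     return max_num
-- ===== SOURCE B (Python) =====
-- def getMaxNumInSubway(subway_inout_list):
--     # Backward suffix recurrence: best over suffix s satisfies
--     # best(d :: s) = max(0, d + best(s)); no running passenger count is kept.
--     best = 0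
--     for out, enter in reversed(subway_inout_list):
--         best = (enter - out) + best
--         if best < 0:
--             best = 0
--     return best
-- ===== Notes on version B (the rewrite author's own statement) =====
-- stated objective: alternative
-- what changed: Replaces the forward scan that maintains the current passenger count and a running max with a backward suffix recurrence best = max(0, delta + best) over the reversed list, which computes the answer without ever forming any prefix sum.
import Mathlib
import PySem

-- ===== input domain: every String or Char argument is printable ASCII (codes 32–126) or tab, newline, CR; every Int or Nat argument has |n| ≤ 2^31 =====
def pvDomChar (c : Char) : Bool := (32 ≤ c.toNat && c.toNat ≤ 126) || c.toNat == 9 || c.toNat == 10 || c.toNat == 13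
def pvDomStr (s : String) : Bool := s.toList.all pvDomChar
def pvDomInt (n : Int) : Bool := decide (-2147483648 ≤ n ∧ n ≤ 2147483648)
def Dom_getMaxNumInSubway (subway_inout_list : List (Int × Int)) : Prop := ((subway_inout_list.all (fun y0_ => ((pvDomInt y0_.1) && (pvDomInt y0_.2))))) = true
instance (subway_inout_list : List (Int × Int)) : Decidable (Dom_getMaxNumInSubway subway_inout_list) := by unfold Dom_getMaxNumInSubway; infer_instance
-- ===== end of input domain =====

-- B replaces A's forward running-count-and-max scan with a backward suffix
-- recurrence best = max(0, delta + best); same O(n) cost, different algorithm.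

-- ===== PORT A =====
-- A: forward loop carrying (max_num, current_num)
def getMaxNumInSubway (subway_inout_list : List (Int × Int)) : Int :=
  (subway_inout_list.foldl
    (fun (s : Int × Int) (inout_list : Int × Int) =>
      let current_num := s.2 - inout_list.1 + inout_list.2
      (max s.1 current_num, current_num))
    (0, 0)).1

-- ===== PORT B =====
-- B: backward loop over the reversed list; best := delta + best, clamped at 0
def getMaxNumInSubway_alt (subway_inout_list : List (Int × Int)) : Int :=
  subway_inout_list.reverse.foldl
    (fun (best : Int) (p : Int × Int) =>
      let best' := (p.2 - p.1) + best
      if best' < 0 then 0 else best')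
    0

-- ===== PRECONDITION & SPEC =====
def Spec_getMaxNumInSubway (subway_inout_list : List (Int × Int)) (out : Int) : Prop := out = getMaxNumInSubway_alt subway_inout_list
instance (subway_inout_list : List (Int × Int)) (out : Int) : Decidable (Spec_getMaxNumInSubway subway_inout_list out) := by unfold Spec_getMaxNumInSubway; infer_instance

-- ===== CLAIM (what is proved, stated in full; the proofs are below) =====
def Claim_equal_getMaxNumInSubway : Prop := ∀ (subway_inout_list : List (Int × Int)), Dom_getMaxNumInSubway subway_inout_list → Spec_getMaxNumInSubway subway_inout_list (getMaxNumInSubway subway_inout_list)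

-- ===== LEMMAS AND PROOFS =====

-- B's loop, rephrased as structural recursion (foldr) for reasoning
def pvBest : List (Int × Int) → Int
  | [] => 0
  | p :: t => max 0 ((p.2 - p.1) + pvBest t)

theorem pvBest_nonneg (l : List (Int × Int)) : 0 ≤ pvBest l := by
  cases l with
  | nil => simp [pvBest]
  | cons p t => simp [pvBest]

theorem pv_alt_eq (l : List (Int × Int)) : getMaxNumInSubway_alt l = pvBest l := by
  unfold getMaxNumInSubway_alt
  rw [← List.foldr_reverse, List.reverse_reverse]
  induction l with
  | nil => rfl
  | cons p t ih =>
      simp only [List.foldr, pvBest, ← ih]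
      omega

theorem pv_fold_eq (l : List (Int × Int)) : ∀ (m c : Int), c ≤ m →
    (l.foldl (fun (s : Int × Int) (p : Int × Int) =>
      let cur := s.2 - p.1 + p.2; (max s.1 cur, cur)) (m, c)).1
    = max m (c + pvBest l) := by
  induction l with
  | nil => intro m c h; simp [pvBest]; omega
  | cons p t ih =>
      intro m c h
      simp only [List.foldl, pvBest]
      rw [ih (max m (c - p.1 + p.2)) (c - p.1 + p.2) (le_max_right _ _)]
      have := pvBest_nonneg t
      omega

-- ===== VERDICT (by name: the statement is the Claim_ definition above) =====
theorem getMaxNumInSubway_spec : Claim_equal_getMaxNumInSubway := by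
  intro l _
  show getMaxNumInSubway l = getMaxNumInSubway_alt l
  rw [pv_alt_eq]
  have := pvBest_nonneg l
  have h := pv_fold_eq l 0 0 (le_refl 0)
  unfold getMaxNumInSubway
  omega
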